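-- pv_equiv track=rewrite | github.com/VladVynnytskyi/Codewars | 7kyu/Remove the minimum.py | remove_smallest
-- ===== SOURCE A (Python) =====
-- def remove_smallest(numbers):
--     result = []
--     if len(numbers) != 0:
--         for num in numbers:
--             result.append(num)
--         result.remove(min(result))
--         return result
--     else:
--         return numbers
-- ===== SOURCE B (Python) =====
-- def remove_smallest(numbers):
--     if not numbers:
--         return numbers
--     best_i, best_v = 0, numbers[0]
--     for j, n in enumerate(numbers):
--         if n < best_v:
--             best_i, best_v = j, n
--     return [n for j, n in enumerate(numbers) if j != best_i]
-- ===== Notes on version B (the rewrite author's own statement) =====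
-- stated objective: simpler
-- what changed: Instead of copying the list element-by-element and calling result.remove(min(result)) (two extra scans plus a value search), B does one explicit pass tracking the value and index of the first minimum (strict <) and rebuilds the list skipping that single index.
import Mathlib
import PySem

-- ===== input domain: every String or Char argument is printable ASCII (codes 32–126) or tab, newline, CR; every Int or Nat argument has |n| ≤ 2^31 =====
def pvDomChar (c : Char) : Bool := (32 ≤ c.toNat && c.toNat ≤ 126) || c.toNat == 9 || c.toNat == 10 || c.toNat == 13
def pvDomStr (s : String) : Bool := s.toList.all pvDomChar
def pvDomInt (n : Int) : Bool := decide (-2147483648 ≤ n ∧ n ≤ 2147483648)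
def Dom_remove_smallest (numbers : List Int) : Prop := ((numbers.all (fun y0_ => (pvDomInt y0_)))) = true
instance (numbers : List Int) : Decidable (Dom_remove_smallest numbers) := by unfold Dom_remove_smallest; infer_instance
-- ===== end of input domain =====

-- B replaces A's copy-then-`result.remove(min(result))` by one pass tracking the first minimum's
-- value and index and a rebuild that skips that index (objective: simpler).

-- ===== PORT A =====
def remove_smallest (numbers : List Int) : List Int :=
  if numbers.length ≠ 0 then
    -- result = []; for num in numbers: result.append(num)
    let result := numbers.foldl (fun acc num => acc ++ [num]) []
    -- result.remove(min(result)); the `none` arms are unreachable totality guards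
    -- (result is nonempty and min(result) ∈ result)
    match PySem.List.min? result (fun y => y) with
    | some m => (PySem.List.remove? result m).getD result
    | none => result
  else numbers

-- ===== PORT B =====
def remove_smallest_alt (numbers : List Int) : List Int :=
  match numbers with
  | [] => numbers
  | x :: _ =>
    -- best_i, best_v = 0, numbers[0]; for j, n in enumerate(numbers): if n < best_v: best_i, best_v = j, n
    let best := (PySem.List.enumerate numbers).foldl
      (fun (p : Int × Int) (jn : Int × Int) => if jn.2 < p.2 then jn else p) (0, x)
    -- [n for j, n in enumerate(numbers) if j != best_i]
    ((PySem.List.enumerate numbers).filter (fun jn => jn.1 != best.1)).map (fun jn => jn.2)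

-- ===== PRECONDITION & SPEC =====
def Spec_remove_smallest (numbers : List Int) (out : List Int) : Prop := out = remove_smallest_alt numbers
instance (numbers : List Int) (out : List Int) : Decidable (Spec_remove_smallest numbers out) := by unfold Spec_remove_smallest; infer_instance

-- ===== CLAIM (what is proved, stated in full; the proofs are below) =====
def Claim_equal_remove_smallest : Prop := ∀ (numbers : List Int), Dom_remove_smallest numbers → Spec_remove_smallest numbers (remove_smallest numbers)

-- ===== LEMMAS AND PROOFS =====

-- running-minimum facts
theorem foldl_min_le_init (t : List Int) (v0 : Int) : t.foldl min v0 ≤ v0 := by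
  induction t generalizing v0 with
  | nil => simp
  | cons y t ih => exact le_trans (ih (min v0 y)) (min_le_left _ _)

theorem foldl_min_le_mem (t : List Int) (v0 z : Int) (hz : z ∈ t) : t.foldl min v0 ≤ z := by
  induction t generalizing v0 with
  | nil => cases hz
  | cons y t ih =>
    rcases List.mem_cons.1 hz with h | h
    · subst h; exact le_trans (foldl_min_le_init t (min v0 z)) (min_le_right _ _)
    · exact ih (min v0 y) h

theorem foldl_min_eq_of_all (t : List Int) (v0 : Int) (h : ∀ z ∈ t, v0 ≤ z) :
    t.foldl min v0 = v0 := by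
  induction t generalizing v0 with
  | nil => rfl
  | cons y t ih =>
    have hy : v0 ≤ y := h y (by simp)
    simp only [List.foldl_cons, min_eq_left hy]
    exact ih v0 (fun z hz => h z (by simp [hz]))

theorem foldl_min_mem (t : List Int) (v0 : Int) :
    t.foldl min v0 = v0 ∨ t.foldl min v0 ∈ t := by
  induction t generalizing v0 with
  | nil => exact Or.inl rfl
  | cons y t ih =>
    rcases ih (min v0 y) with h | h
    · rcases le_total v0 y with hvy | hvy
      · left; simpa [min_eq_left hvy] using h
      · right; simp only [List.foldl_cons]; rw [h, min_eq_right hvy]; simp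
    · right; simp [List.foldl_cons, h]

-- index of the first occurrence of the running minimum (proof-side spec of B's loop)
def fIdx (v0 : Int) : List Int → Int
  | [] => 0
  | y :: t => if y < v0 ∧ ∀ z ∈ t, y ≤ z then 0 else 1 + fIdx (min v0 y) t

theorem fIdx_nonneg (l : List Int) (v0 : Int) : 0 ≤ fIdx v0 l := by
  induction l generalizing v0 with
  | nil => simp [fIdx]
  | cons y t ih =>
    by_cases h : y < v0 ∧ ∀ z ∈ t, y ≤ z
    · simp only [fIdx, if_pos h]; omega
    · simp only [fIdx, if_neg h]; have := ih (min v0 y); omega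

-- characterisation of B's tracking loop
theorem fold_char (xs : List Int) (s i0 v0 : Int) :
    (PySem.List.enumerate xs s).foldl
        (fun (p : Int × Int) (jn : Int × Int) => if jn.2 < p.2 then jn else p) (i0, v0)
      = if ∀ z ∈ xs, v0 ≤ z then (i0, v0) else (s + fIdx v0 xs, xs.foldl min v0) := by
  induction xs generalizing s i0 v0 with
  | nil => simp [PySem.List.enumerate]
  | cons y t ih =>
    rw [PySem.List.enumerate_cons, List.foldl_cons]
    by_cases hall : ∀ z ∈ y :: t, v0 ≤ z
    · have hy : v0 ≤ y := hall y (by simp)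
      have ht : ∀ z ∈ t, v0 ≤ z := fun z hz => hall z (by simp [hz])
      simp only [not_lt.2 hy, if_false, if_pos hall]
      rw [ih, if_pos ht]
    · rw [if_neg hall]
      by_cases hy : y < v0
      · simp only [if_pos hy]
        rw [ih (s + 1) s y]
        by_cases hall2 : ∀ z ∈ t, y ≤ z
        · rw [if_pos hall2]
          have hm : t.foldl min (min v0 y) = y := by
            rw [min_eq_right hy.le]; exact foldl_min_eq_of_all t y hall2
          have hf : fIdx v0 (y :: t) = 0 := by simp only [fIdx, if_pos (And.intro hy hall2)]
          rw [hf]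
          exact Prod.ext (by ring) (by rw [List.foldl_cons, hm])
        · rw [if_neg hall2]
          have h1 : fIdx v0 (y :: t) = 1 + fIdx y t := by
            have hnc : ¬ (y < v0 ∧ ∀ z ∈ t, y ≤ z) := fun hh => hall2 hh.2
            simp [fIdx, hnc, min_eq_right hy.le]
          have h2 : (y :: t).foldl min v0 = t.foldl min y := by
            simp [List.foldl_cons, min_eq_right hy.le]
          rw [h1, h2]
          exact Prod.ext (by push_cast; ring) rfl
      · simp only [if_neg hy]
        rw [ih (s + 1) i0 v0]
        have hex : ¬ ∀ z ∈ t, v0 ≤ z := by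
          intro hh
          exact hall (fun z hz => by
            rcases List.mem_cons.1 hz with h' | h'
            · subst h'; omega
            · exact hh z h')
        rw [if_neg hex]
        have hmin : min v0 y = v0 := min_eq_left (by omega)
        have h1 : fIdx v0 (y :: t) = 1 + fIdx v0 t := by
          have hnc : ¬ (y < v0 ∧ ∀ z ∈ t, y ≤ z) := fun hh => hy hh.1
          simp only [fIdx, if_neg hnc, hmin]
        have h2 : (y :: t).foldl min v0 = t.foldl min v0 := by
          simp only [List.foldl_cons, hmin]
        rw [h1, h2]
        exact Prod.ext (by push_cast; ring) rfl

-- the rebuild keeps everything when the banned index is below all indices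
theorem filter_enum_lt (t : List Int) (s i : Int) (h : i < s) :
    (PySem.List.enumerate t s).filter (fun jn => jn.1 != i) = PySem.List.enumerate t s := by
  induction t generalizing s with
  | nil => simp [PySem.List.enumerate]
  | cons y t ih =>
    rw [PySem.List.enumerate_cons, List.filter_cons]
    have hb : ((s, y).1 != i) = true := by simp; omega
    rw [if_pos hb, ih (s + 1) (by omega)]

-- skipping index s + k in the rebuild is eraseIdx k
theorem filter_enum_eraseIdx (l : List Int) (s : Int) (k : Nat) :
    ((PySem.List.enumerate l s).filter (fun jn => jn.1 != s + (k : Int))).map (fun jn => jn.2)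
      = l.eraseIdx k := by
  induction l generalizing s k with
  | nil => simp [PySem.List.enumerate]
  | cons y t ih =>
    rw [PySem.List.enumerate_cons, List.filter_cons]
    cases k with
    | zero =>
      rw [if_neg (by simp)]
      rw [filter_enum_lt t (s + 1) (s + ((0 : Nat) : Int)) (by push_cast; omega)]
      simp [PySem.List.map_snd_enumerate]
    | succ j =>
      have hb : ((s, y).1 != s + ((j + 1 : Nat) : Int)) = true := by simp; omega
      rw [if_pos hb, List.map_cons]
      have hs : s + ((j + 1 : Nat) : Int) = (s + 1) + (j : Int) := by push_cast; ring
      rw [hs, ih (s + 1) j]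
      rfl

-- erasing the minimum value = erasing at the first-minimum index
theorem eraseIdx_fIdx_eq_erase (l : List Int) (v0 : Int) (h : ∃ z ∈ l, z < v0) :
    l.eraseIdx (fIdx v0 l).toNat = l.erase (l.foldl min v0) := by
  induction l generalizing v0 with
  | nil => rcases h with ⟨z, hz, _⟩; cases hz
  | cons y t ih =>
    by_cases hc : y < v0 ∧ ∀ z ∈ t, y ≤ z
    · have hm : t.foldl min (min v0 y) = y := by
        rw [min_eq_right hc.1.le]; exact foldl_min_eq_of_all t y hc.2
      have hf : fIdx v0 (y :: t) = 0 := by simp only [fIdx, if_pos hc]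
      rw [hf, List.foldl_cons, hm]
      simp [List.erase_cons_head]
    · have hext : ∃ z ∈ t, z < min v0 y := by
        by_cases hy : y < v0
        · have hex : ∃ z ∈ t, z < y := by
            by_contra hno; push Not at hno
            exact hc ⟨hy, fun z hz => hno z hz⟩
          rcases hex with ⟨z, hz, hzy⟩
          exact ⟨z, hz, lt_min (by omega) hzy⟩
        · rcases h with ⟨z, hzmem, hzlt⟩
          have hzt : z ∈ t := by
            rcases List.mem_cons.1 hzmem with h' | h'
            · omega
            · exact h'
          exact ⟨z, hzt, lt_min hzlt (by omega)⟩
      have hmlt : t.foldl min (min v0 y) < y := by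
        rcases hext with ⟨z, hz, hzlt⟩
        have := foldl_min_le_mem t (min v0 y) z hz
        have := min_le_right v0 y
        omega
      have hne : (y == t.foldl min (min v0 y)) = false := by simp; omega
      have hstep : (fIdx v0 (y :: t)).toNat = (fIdx (min v0 y) t).toNat + 1 := by
        have h1 : fIdx v0 (y :: t) = 1 + fIdx (min v0 y) t := by simp [fIdx, hc]
        have h2 := fIdx_nonneg t (min v0 y)
        omega
      rw [hstep, List.eraseIdx_cons_succ, ih _ hext, List.foldl_cons, List.erase_cons, hne]
      simp

-- ===== VERDICT (by name: the statement is the Claim_ definition above) =====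
theorem remove_smallest_spec : Claim_equal_remove_smallest := by
  intro numbers _
  unfold Spec_remove_smallest
  cases numbers with
  | nil => rfl
  | cons x xs =>
    have hm_mem : xs.foldl min x ∈ x :: xs := by
      rcases foldl_min_mem xs x with h | h
      · rw [h]; simp
      · simp [h]
    have hA : remove_smallest (x :: xs) = (x :: xs).erase (xs.foldl min x) := by
      unfold remove_smallest
      rw [if_pos (by simp)]
      simp only [PySem.List.foldl_append_singleton, List.nil_append, PySem.List.min?_id_cons,
        PySem.List.remove?_eq_some_erase _ _ hm_mem, Option.getD_some]
    have hBdef : remove_smallest_alt (x :: xs) =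
        ((PySem.List.enumerate (x :: xs)).filter (fun jn =>
          jn.1 != ((PySem.List.enumerate (x :: xs)).foldl
            (fun (p : Int × Int) (jn : Int × Int) => if jn.2 < p.2 then jn else p) (0, x)).1)).map
          (fun jn => jn.2) := rfl
    have hfold := fold_char (x :: xs) 0 0 x
    by_cases hall : ∀ z ∈ x :: xs, x ≤ z
    · rw [hBdef, hfold, if_pos hall]
      have hmx : xs.foldl min x = x :=
        foldl_min_eq_of_all xs x (fun z hz => hall z (by simp [hz]))
      have h0 : (((0 : Int), x)).1 = ((0 : Int) + ((0 : Nat) : Int)) := by norm_num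
      rw [h0, filter_enum_eraseIdx (x :: xs) 0 0, List.eraseIdx_cons_zero, hA, hmx,
        List.erase_cons_head]
    · rw [hBdef, hfold, if_neg hall]
      have hex : ∃ z ∈ x :: xs, z < x := by
        push Not at hall
        rcases hall with ⟨z, hz, hzx⟩
        exact ⟨z, hz, by omega⟩
      have h1 : (((0 : Int) + fIdx x (x :: xs), List.foldl min x (x :: xs))).1
          = (0 : Int) + (((fIdx x (x :: xs)).toNat : Nat) : Int) := by
        have := fIdx_nonneg (x :: xs) x
        simp
        omega
      rw [h1, filter_enum_eraseIdx (x :: xs) 0 (fIdx x (x :: xs)).toNat,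
        eraseIdx_fIdx_eq_erase (x :: xs) x hex, hA, List.foldl_cons, min_self]
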